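-- pv_equiv track=rewrite | github.com/sunnythakr/Python_basic | LIST_03/41.py | booleanMatrix
-- ===== SOURCE A (Python) =====
-- def booleanMatrix(matrix):
--     R = len(matrix)
--     C = len(matrix[0])
--
--     rowFlag = [0] * R
--     colFlag = [0] * C
--
--     # Mark the rows and columns to be modified
--     for i in range(R):
--         for j in range(C):
--             if matrix[i][j] == 1:
--                 rowFlag[i] = 1
--                 colFlag[j] = 1
--
--     # Modify the matrix based on rowFlag and colFlag
--     for i in range(R):
--         for j in range(C):
--             if rowFlag[i] == 1 or colFlag[j] == 1:
--                 matrix[i][j] = 1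
--
--     return matrix
-- ===== SOURCE B (Python) =====
-- def booleanMatrix(matrix):
--     # Classic O(1)-extra-space variant: use the matrix's own first row and first
--     # column as the flag storage instead of separate rowFlag/colFlag arrays.
--     R = len(matrix)
--     C = len(matrix[0])
--     if C == 0:
--         return matrix
--     first_row_has_one = any(matrix[0][j] == 1 for j in range(C))
--     first_col_has_one = any(matrix[i][0] == 1 for i in range(R))
--     # record interior hits in the first row / first column
--     for i in range(1, R):
--         for j in range(1, C):
--             if matrix[i][j] == 1:
--                 matrix[i][0] = 1
--                 matrix[0][j] = 1
--     # spread the recorded flags over the interior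
--     for i in range(1, R):
--         for j in range(1, C):
--             if matrix[i][0] == 1 or matrix[0][j] == 1:
--                 matrix[i][j] = 1
--     if first_row_has_one:
--         for j in range(C):
--             matrix[0][j] = 1
--     if first_col_has_one:
--         for i in range(R):
--             matrix[i][0] = 1
--     return matrix
-- ===== Notes on version B (the rewrite author's own statement) =====
-- stated objective: alternative
-- what changed: A allocates separate rowFlag/colFlag arrays and rewrites every cell governed by them; B is the classic O(1)-extra-space variant that stores the flags inside the matrix itself (its first row and first column), first saving two booleans for row 0 / column 0, marking interior hits into the border, spreading the border flags over the interior, and finally filling row 0 / column 0 from the saved booleans.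
import Mathlib
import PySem

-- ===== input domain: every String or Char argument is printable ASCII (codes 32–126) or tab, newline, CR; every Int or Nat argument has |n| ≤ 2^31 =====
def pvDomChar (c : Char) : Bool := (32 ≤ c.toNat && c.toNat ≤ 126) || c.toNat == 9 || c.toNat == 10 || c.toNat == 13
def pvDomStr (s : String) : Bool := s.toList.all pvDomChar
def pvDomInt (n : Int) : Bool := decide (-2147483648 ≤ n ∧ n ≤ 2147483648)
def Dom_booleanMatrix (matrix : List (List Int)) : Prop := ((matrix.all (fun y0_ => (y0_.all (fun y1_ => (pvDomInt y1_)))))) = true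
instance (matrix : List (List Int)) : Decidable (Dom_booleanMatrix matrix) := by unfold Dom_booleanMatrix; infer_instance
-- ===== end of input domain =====

-- B replaces A's separate rowFlag/colFlag arrays by the classic O(1)-extra-space variant
-- that stores the flags inside the matrix's own first row and first column (objective:
-- alternative).  A mutates its argument in place; the equivalence proved here is about the
-- RETURN value only (B performs the same in-place mutation in Python).

-- ===== PORT A =====
def booleanMatrix (matrix : List (List Int)) : List (List Int) :=
  let R := matrix.length
  let C := (matrix.headD []).length
  -- rowFlag = [0]*R ; colFlag = [0]*C ; marking double loop
  let flags :=
    (List.range R).foldl (fun (fl : List Int × List Int) i =>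
      (List.range C).foldl (fun (fl : List Int × List Int) j =>
        if (matrix.getD i []).getD j 0 == 1 then (fl.1.set i 1, fl.2.set j 1) else fl) fl)
      (List.replicate R 0, List.replicate C 0)
  -- modification double loop: matrix[i][j] = 1 where rowFlag[i]==1 or colFlag[j]==1
  (List.range R).foldl (fun m i =>
    (List.range C).foldl (fun m j =>
      if flags.1.getD i 0 == 1 || flags.2.getD j 0 == 1 then
        m.set i ((m.getD i []).set j 1)
      else m) m) matrix

-- ===== PORT B =====
def booleanMatrix_alt (matrix : List (List Int)) : List (List Int) :=
  let R := matrix.length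
  let C := (matrix.headD []).length
  if C = 0 then matrix else
  let firstRow := (List.range C).any (fun j => (matrix.getD 0 []).getD j 0 == 1)
  let firstCol := (List.range R).any (fun i => (matrix.getD i []).getD 0 0 == 1)
  -- record interior hits in the first row / first column (matrix[i][0]=1; matrix[0][j]=1)
  let m1 := (List.range' 1 (R - 1)).foldl (fun m i =>
    (List.range' 1 (C - 1)).foldl (fun m j =>
      if (m.getD i []).getD j 0 == 1 then
        (m.set i ((m.getD i []).set 0 1)).set 0
          (((m.set i ((m.getD i []).set 0 1)).getD 0 []).set j 1)
      else m) m) matrix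
  -- spread the recorded flags over the interior
  let m2 := (List.range' 1 (R - 1)).foldl (fun m i =>
    (List.range' 1 (C - 1)).foldl (fun m j =>
      if (m.getD i []).getD 0 0 == 1 || (m.getD 0 []).getD j 0 == 1 then
        m.set i ((m.getD i []).set j 1)
      else m) m) m1
  let m3 := if firstRow then
      (List.range C).foldl (fun m j => m.set 0 ((m.getD 0 []).set j 1)) m2
    else m2
  if firstCol then
    (List.range R).foldl (fun m i => m.set i ((m.getD i []).set 0 1)) m3
  else m3

-- ===== PRECONDITION & SPEC =====
-- Pre_ excludes exactly the inputs on which Python A raises IndexError: the empty matrix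
-- (len(matrix[0])) and matrices with a row shorter than the first row (matrix[i][j] access).
def Pre_booleanMatrix (matrix : List (List Int)) : Prop :=
  matrix ≠ [] ∧ ∀ row ∈ matrix, (matrix.headD []).length ≤ row.length
instance (matrix : List (List Int)) : Decidable (Pre_booleanMatrix matrix) := by
  unfold Pre_booleanMatrix; infer_instance

def pvWitness_booleanMatrix : List (List Int) := [[0, 1, 2], [0, 0, 0], [5, 0, 7]]

def Spec_booleanMatrix (matrix : List (List Int)) (out : List (List Int)) : Prop := out = booleanMatrix_alt matrix
instance (matrix : List (List Int)) (out : List (List Int)) : Decidable (Spec_booleanMatrix matrix out) := by unfold Spec_booleanMatrix; infer_instance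

-- ===== CLAIM (what is proved, stated in full; the proofs are below) =====
def Claim_equal_booleanMatrix : Prop := ∀ (matrix : List (List Int)), Dom_booleanMatrix matrix → Pre_booleanMatrix matrix → Spec_booleanMatrix matrix (booleanMatrix matrix)

-- ===== LEMMAS AND PROOFS =====

-- proof-only middleman: a row-map description of the common result; A and B are each
-- proved equal to it under Pre_
def pvSpecMap (matrix : List (List Int)) : List (List Int) :=
  let C := (matrix.headD []).length
  let hotCols := (List.range C).map (fun j => matrix.any (fun row => row.getD j 0 == 1))
  matrix.map (fun row =>
    if (row.take C).contains 1 then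
      List.replicate C 1 ++ row.drop C
    else
      (List.range C).foldl (fun r j => if hotCols.getD j false then r.set j 1 else r) row)

-- a fold of conditional `set`s preserves length
theorem pv_foldl_set_length (p : Nat → Bool) (js : List Nat) (cf : List Int) :
    (js.foldl (fun cf j => if p j then cf.set j 1 else cf) cf).length = cf.length := by
  induction js generalizing cf with
  | nil => rfl
  | cons j js ih => simp only [List.foldl_cons]; split <;> simp [ih]

-- getD after a single set
theorem pv_getD_set {α : Type} (l : List α) (i t : Nat) (a d : α) :
    (l.set i a).getD t d = if t = i ∧ t < l.length then a else l.getD t d := by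
  rcases eq_or_ne t i with rfl | h
  · by_cases ht : t < l.length
    · simp [List.getD_eq_getElem?_getD, List.getElem?_set_self', ht]
    · simp [List.getD_eq_getElem?_getD, List.getElem?_set_self', ht]
  · simp [List.getD_eq_getElem?_getD, List.getElem?_set_ne (Ne.symm h), h]

-- entrywise value of a fold of conditional `set`s at the loop index
theorem pv_foldl_set_getD (p : Nat → Bool) (d : Int) (c : Nat) (cf : List Int) (t : Nat) :
    ((List.range c).foldl (fun cf j => if p j then cf.set j 1 else cf) cf).getD t d
      = if t < c ∧ p t = true ∧ t < cf.length then 1 else cf.getD t d := by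
  induction c generalizing cf with
  | zero => simp
  | succ c ih =>
      rw [List.range_succ, List.foldl_append]
      simp only [List.foldl_cons, List.foldl_nil]
      by_cases hpc : p c = true
      · rw [if_pos hpc, pv_getD_set, pv_foldl_set_length, ih]
        by_cases h1 : t = c
        · subst h1
          by_cases h2 : t < cf.length <;> simp [h2, hpc, Nat.lt_succ_self]
        · have h2 : t < c + 1 ↔ t < c := by omega
          simp [h1, h2]
      · rw [if_neg hpc, ih]
        by_cases h1 : t = c
        · subst h1
          simp [hpc]
        · have h2 : t < c + 1 ↔ t < c := by omega
          simp [h2]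

-- a fold of conditional `set`s at a FIXED index is one conditional `set`
theorem pv_foldl_set_const (p : Nat → Bool) (i : Nat) (js : List Nat) (rf : List Int) :
    (js.foldl (fun rf j => if p j then rf.set i 1 else rf) rf)
      = if js.any p then rf.set i 1 else rf := by
  induction js generalizing rf with
  | nil => simp
  | cons j js ih =>
      simp only [List.foldl_cons, List.any_cons]
      by_cases h : p j = true
      · simp [h, ih, List.set_set]
      · simp [h, ih]

-- the marking loop's pair state splits into two independent folds (inner loop)
theorem pv_inner_split (hit : Nat → Nat → Bool) (i : Nat) (js : List Nat) (rf cf : List Int) :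
    (js.foldl (fun (fl : List Int × List Int) j =>
        if hit i j then (fl.1.set i 1, fl.2.set j 1) else fl) (rf, cf))
      = (js.foldl (fun rf j => if hit i j then rf.set i 1 else rf) rf,
         js.foldl (fun cf j => if hit i j then cf.set j 1 else cf) cf) := by
  induction js generalizing rf cf with
  | nil => rfl
  | cons j js ih =>
      simp only [List.foldl_cons]
      by_cases h : hit i j = true <;> simp [h, ih]

-- the marking loop's pair state splits into two independent folds (outer loop)
theorem pv_mark_split (hit : Nat → Nat → Bool) (is js : List Nat) (rf cf : List Int) :
    (is.foldl (fun (fl : List Int × List Int) i =>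
        js.foldl (fun (fl : List Int × List Int) j =>
          if hit i j then (fl.1.set i 1, fl.2.set j 1) else fl) fl) (rf, cf))
      = (is.foldl (fun rf i => js.foldl (fun rf j => if hit i j then rf.set i 1 else rf) rf) rf,
         is.foldl (fun cf i => js.foldl (fun cf j => if hit i j then cf.set j 1 else cf) cf) cf) := by
  induction is generalizing rf cf with
  | nil => rfl
  | cons i is ih =>
      simp only [List.foldl_cons]
      rw [pv_inner_split, ih]

-- column-flag outer fold, entrywise
theorem pv_colfold_getD (hit : Nat → Nat → Bool) (C : Nat) (d : Int)
    (rs : List Nat) (cf : List Int) (t : Nat) :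
    ((rs.foldl (fun cf i =>
        (List.range C).foldl (fun cf j => if hit i j then cf.set j 1 else cf) cf) cf).getD t d)
      = if t < C ∧ t < cf.length ∧ rs.any (fun i => hit i t) then 1 else cf.getD t d := by
  induction rs generalizing cf with
  | nil => simp
  | cons i rs ih =>
      simp only [List.foldl_cons, List.any_cons]
      rw [ih, pv_foldl_set_length, pv_foldl_set_getD]
      by_cases h1 : t < C <;> by_cases h2 : t < cf.length <;>
        by_cases h3 : hit i t = true <;> simp [h1, h2, h3]

-- phase-2 inner loop: the whole-matrix fold is one row update
theorem pv_rowupd (p : Nat → Bool) (js : List Nat) (m : List (List Int)) (i : Nat)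
    (hi : i < m.length) :
    (js.foldl (fun m j => if p j then m.set i ((m.getD i []).set j 1) else m) m)
      = m.set i (js.foldl (fun r j => if p j then r.set j 1 else r) (m.getD i [])) := by
  induction js generalizing m with
  | nil =>
      simp only [List.foldl_nil]
      rw [List.getD_eq_getElem _ _ hi, List.set_getElem_self]
  | cons j js ih =>
      simp only [List.foldl_cons, List.foldl_cons]
      by_cases h : p j = true
      · simp only [h, if_true]
        rw [ih _ (by simpa using hi), List.set_set, pv_getD_set]
        simp [hi]
      · simp only [h, if_neg (by simp [h] : ¬ (false = true))]
        exact ih _ hi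

-- phase-2 loop: length and rows of the result
theorem pv_phase2 (p2 : Nat → Nat → Bool) (C k : Nat) (m : List (List Int))
    (hk : k ≤ m.length) :
    let G := fun (i : Nat) (r : List Int) =>
      (List.range C).foldl (fun r j => if p2 i j then r.set j 1 else r) r
    let res := (List.range k).foldl (fun m i =>
      (List.range C).foldl (fun m j =>
        if p2 i j then m.set i ((m.getD i []).set j 1) else m) m) m
    res.length = m.length ∧ ∀ t, res.getD t [] = if t < k then G t (m.getD t []) else m.getD t [] := by
  induction k with
  | zero => simp
  | succ k ih =>
      intro G res
      obtain ⟨hlen, hent⟩ := ih (Nat.le_of_succ_le hk)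
      have hres : res = ((List.range k).foldl (fun m i =>
          (List.range C).foldl (fun m j =>
            if p2 i j then m.set i ((m.getD i []).set j 1) else m) m) m).set k
          (G k (((List.range k).foldl (fun m i =>
          (List.range C).foldl (fun m j =>
            if p2 i j then m.set i ((m.getD i []).set j 1) else m) m) m).getD k [])) := by
        show (List.range (k + 1)).foldl _ m = _
        rw [List.range_succ, List.foldl_append, List.foldl_cons, List.foldl_nil]
        exact pv_rowupd (p2 k) (List.range C) _ k (by rw [hlen]; omega)
      constructor
      · rw [hres, List.length_set]; exact hlen
      · intro t
        rw [hres, pv_getD_set, hlen]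
        rcases Nat.lt_trichotomy t k with h | h | h
        · rw [if_neg (fun hc => absurd hc.1 (Nat.ne_of_lt h)), hent,
            if_pos h, if_pos (Nat.lt_succ_of_lt h)]
        · subst h
          rw [if_pos ⟨rfl, by omega⟩, hent, if_neg (Nat.lt_irrefl t), if_pos (Nat.lt_succ_self t)]
        · rw [if_neg (fun hc => absurd hc.1 (by omega)), hent,
            if_neg (by omega), if_neg (by omega)]

-- any over the rows = any over row indices
theorem pv_any_range (m : List (List Int)) (f : List Int → Bool) :
    m.any f = (List.range m.length).any (fun i => f (m.getD i [])) := by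
  rw [Bool.eq_iff_iff]
  simp only [List.any_eq_true, List.mem_range]
  constructor
  · rintro ⟨x, hx, hfx⟩
    obtain ⟨i, hi, rfl⟩ := List.mem_iff_getElem.1 hx
    exact ⟨i, hi, by rwa [List.getD_eq_getElem _ _ hi]⟩
  · rintro ⟨i, hi, hf⟩
    exact ⟨m[i], List.getElem_mem hi, by rwa [List.getD_eq_getElem _ _ hi] at hf⟩

-- membership test `1 in row[:C]` = indexed any
theorem pv_contains_take (row : List Int) (C : Nat) (h : C ≤ row.length) :
    (row.take C).contains 1 = (List.range C).any (fun j => row.getD j 0 == 1) := by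
  rw [Bool.eq_iff_iff]
  simp only [List.contains_iff_exists_mem_beq, List.any_eq_true, List.mem_range, List.mem_take_iff_getElem]
  constructor
  · rintro ⟨x, ⟨j, hj, rfl⟩, hbeq⟩
    refine ⟨j, by omega, ?_⟩
    rw [List.getD_eq_getElem _ _ (by omega)]
    simp only [beq_iff_eq] at hbeq ⊢
    exact hbeq.symm
  · rintro ⟨j, hj, hbeq⟩
    rw [List.getD_eq_getElem _ _ (by omega)] at hbeq
    simp only [beq_iff_eq] at hbeq
    exact ⟨row[j]'(by omega), ⟨j, by omega, rfl⟩, by simp only [beq_iff_eq]; exact hbeq.symm⟩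

-- `row[0:C] = [1]*C`, entrywise
theorem pv_getD_fill (row : List Int) (C : Nat) (h : C ≤ row.length) (j : Nat) :
    (List.replicate C (1 : Int) ++ row.drop C).getD j 0 = if j < C then 1 else row.getD j 0 := by
  by_cases hj : j < C
  · rw [List.getD_append _ _ _ _ (by simpa using hj), List.getD_replicate _ hj, if_pos hj]
  · rw [List.getD_append_right _ _ _ _ (by simpa using hj), if_neg hj]
    rw [List.length_replicate]
    have hCj : C + (j - C) = j := by omega
    rw [List.getD_eq_getElem?_getD, List.getD_eq_getElem?_getD, List.getElem?_drop, hCj]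

-- lists equal from equal lengths and equal getD
theorem pv_getD_ext {α : Type} (d : α) (l₁ l₂ : List α) (hlen : l₁.length = l₂.length)
    (h : ∀ j, l₁.getD j d = l₂.getD j d) : l₁ = l₂ := by
  apply List.ext_getElem hlen
  intro j h1 h2
  have := h j
  rwa [List.getD_eq_getElem _ _ h1, List.getD_eq_getElem _ _ h2] at this

-- the heart of the A-side proof: phase 2 with characterized flag vectors equals the row map
theorem pv_main (m : List (List Int)) (C : Nat) (RF CF : List Int)
    (hrows : ∀ row ∈ m, C ≤ row.length)
    (hRF : ∀ t, RF.getD t 0 = if t < m.length ∧ (List.range C).any (fun j => (m.getD t []).getD j 0 == 1) then 1 else 0)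
    (hCF : ∀ j, CF.getD j 0 = if j < C ∧ (List.range m.length).any (fun i => (m.getD i []).getD j 0 == 1) then 1 else 0) :
    (List.range m.length).foldl (fun m1 i =>
      (List.range C).foldl (fun m2 j =>
        if RF.getD i 0 == 1 || CF.getD j 0 == 1 then m2.set i ((m2.getD i []).set j 1) else m2) m1) m
    = m.map (fun row =>
        if (row.take C).contains 1 then List.replicate C 1 ++ row.drop C
        else (List.range C).foldl (fun r j =>
          if (List.map (fun j => m.any fun row => row.getD j 0 == 1) (List.range C)).getD j false then r.set j 1 else r) row) := by
  obtain ⟨hAlen, hArow⟩ :=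
    pv_phase2 (fun i j => RF.getD i 0 == 1 || CF.getD j 0 == 1) C m.length m (le_refl _)
  have hmap : ∀ j : Nat,
      (List.map (fun j => m.any fun row => row.getD j 0 == 1) (List.range C)).getD j false
        = (if j < C then (List.range m.length).any (fun i => (m.getD i []).getD j 0 == 1) else false) := by
    intro j
    by_cases hj : j < C
    · rw [PySem.List.getD_map_range _ _ _ _ hj, if_pos hj, pv_any_range]
    · rw [if_neg hj, List.getD_eq_getElem?_getD, List.getElem?_eq_none (by simp; omega)]
      rfl
  refine pv_getD_ext [] _ _ ?_ ?_
  · rw [List.length_map]; exact hAlen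
  · intro t
    rw [hArow t]
    by_cases ht : t < m.length
    · have hg : m.getD t [] = m[t] := List.getD_eq_getElem _ _ ht
      rw [if_pos ht]
      conv_rhs => rw [List.getD_eq_getElem?_getD, List.getElem?_map, List.getElem?_eq_getElem ht]
      simp only [Option.map_some, Option.getD_some]
      rw [← hg]
      have hCrow : C ≤ (m.getD t []).length := by rw [hg]; exact hrows _ (List.getElem_mem ht)
      rw [pv_contains_take _ _ hCrow]
      by_cases hhot : (List.range C).any (fun j => (m.getD t []).getD j 0 == 1) = true
      · rw [if_pos hhot]
        refine pv_getD_ext 0 _ _ ?_ ?_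
        · rw [pv_foldl_set_length]
          rw [List.length_append, List.length_replicate, List.length_drop]
          omega
        · intro j
          rw [pv_foldl_set_getD, pv_getD_fill _ _ hCrow]
          have hRF1 : RF.getD t 0 = 1 := by rw [hRF, if_pos ⟨ht, hhot⟩]
          rw [hRF1]
          by_cases hj : j < C
          · have hjl : j < (m.getD t []).length := by omega
            rw [if_pos ⟨hj, by simp, hjl⟩, if_pos hj]
          · rw [if_neg (fun hc => hj hc.1), if_neg hj]
      · rw [if_neg hhot]
        refine pv_getD_ext 0 _ _ ?_ ?_
        · rw [pv_foldl_set_length, pv_foldl_set_length]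
        · intro j
          rw [pv_foldl_set_getD, pv_foldl_set_getD]
          have hRF0 : RF.getD t 0 = 0 := by
            rw [hRF, if_neg (fun hc => hhot hc.2)]
          rw [hRF0, hCF, hmap]
          by_cases hj : j < C
          · by_cases hc : (List.range m.length).any (fun i => (m.getD i []).getD j 0 == 1) = true
            · by_cases hjl : j < (m.getD t []).length
              · rw [if_pos ⟨hj, by rw [if_pos ⟨hj, hc⟩]; decide, hjl⟩,
                  if_pos ⟨hj, by rw [if_pos hj]; exact hc, hjl⟩]
              · rw [if_neg (fun h => hjl h.2.2), if_neg (fun h => hjl h.2.2)]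
            · rw [if_neg, if_neg]
              · intro h
                have := h.2.1
                rw [if_pos hj] at this
                exact hc this
              · intro h
                have := h.2.1
                rw [if_neg (fun hx => hc hx.2)] at this
                exact absurd this (by decide)
          · rw [if_neg (fun h => hj h.1), if_neg (fun h => hj h.1)]
    · have hnone : m[t]? = none := List.getElem?_eq_none (by omega)
      rw [if_neg ht, List.getD_eq_getElem?_getD, List.getD_eq_getElem?_getD,
        List.getElem?_map, hnone]
      rfl

-- A equals the row-map description
theorem pv_A_eq_spec (m : List (List Int)) (hpre : Pre_booleanMatrix m) :
    booleanMatrix m = pvSpecMap m := by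
  obtain ⟨hne, hrows⟩ := hpre
  unfold booleanMatrix pvSpecMap
  simp only []
  rw [pv_mark_split (fun i j => (m.getD i []).getD j 0 == 1)]
  have hrep : ∀ (n t : Nat), (List.replicate n (0:Int)).getD t 0 = 0 := by
    intro n t
    rw [List.getD_eq_getElem?_getD, List.getElem?_replicate]
    split <;> rfl
  refine pv_main m ((m.headD []).length) _ _ hrows ?_ ?_
  · intro t
    rw [congrArg (fun f => List.foldl f (List.replicate m.length (0:Int)) (List.range m.length))
        (funext fun rf => funext fun i =>
          pv_foldl_set_const (fun j => (m.getD i []).getD j 0 == 1) i (List.range ((m.headD []).length)) rf)]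
    rw [pv_foldl_set_getD, hrep, List.length_replicate]
    by_cases h1 : t < m.length <;>
      by_cases h2 : (List.range ((m.headD []).length)).any (fun j => (m.getD t []).getD j 0 == 1) = true <;>
        simp [h1, h2]
  · intro j
    rw [pv_colfold_getD, hrep, List.length_replicate]
    by_cases h1 : j < (m.headD []).length <;>
      by_cases h2 : (List.range m.length).any (fun i => (m.getD i []).getD j 0 == 1) = true <;>
        simp [h1, h2]

-- ======================= B-side lemmas =======================

-- getD beyond the length is the default
theorem pv_getD_nil {α : Type} (l : List α) (d : α) (t : Nat) (h : l.length ≤ t) :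
    l.getD t d = d := by
  rw [List.getD_eq_getElem?_getD, List.getElem?_eq_none (by omega)]; rfl

-- headD is getD 0
theorem pv_headD_getD (m : List (List Int)) : m.headD [] = m.getD 0 [] := by
  cases m <;> rfl

-- entrywise value of a conditional-set fold over range' 1 n
theorem pvb_foldl_set_getD (p : Nat → Bool) (n : Nat) (cf : List Int) (t : Nat) :
    ((List.range' 1 n).foldl (fun cf j => if p j then cf.set j 1 else cf) cf).getD t 0
      = if 1 ≤ t ∧ t < 1 + n ∧ p t = true ∧ t < cf.length then 1 else cf.getD t 0 := by
  induction n with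
  | zero =>
      simp
      omega
  | succ n ih =>
      rw [List.range'_1_concat, List.foldl_append, List.foldl_cons, List.foldl_nil]
      by_cases hpc : p (1 + n) = true
      · rw [if_pos hpc, pv_getD_set, pv_foldl_set_length, ih]
        by_cases h1 : t = 1 + n
        · by_cases h2 : t < cf.length <;> simp [h1, h2, hpc] <;> omega
        · have h2 : t < 1 + (n + 1) ↔ t < 1 + n ∨ t = 1 + n := by omega
          simp [h1, h2]
      · rw [if_neg hpc, ih]
        by_cases h1 : t = 1 + n
        · simp [h1, hpc]
        · have h2 : (t < 1 + (n + 1) ↔ t < 1 + n ∨ t = 1 + n) := by omega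
          simp [h1, h2]

-- double fold (rows outside, range' 1 n inside) of conditional sets: length
theorem pvb_col_len (hit : Nat → Nat → Bool) (n : Nat) (rs : List Nat) (cf : List Int) :
    (rs.foldl (fun cf i =>
        (List.range' 1 n).foldl (fun cf j => if hit i j then cf.set j 1 else cf) cf) cf).length
      = cf.length := by
  induction rs generalizing cf with
  | nil => rfl
  | cons i rs ih => rw [List.foldl_cons, ih, pv_foldl_set_length]

-- double fold (rows outside, range' 1 n inside) of conditional sets: entrywise
theorem pvb_col_getD (hit : Nat → Nat → Bool) (n : Nat) (rs : List Nat) (cf : List Int) (t : Nat) :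
    ((rs.foldl (fun cf i =>
        (List.range' 1 n).foldl (fun cf j => if hit i j then cf.set j 1 else cf) cf) cf).getD t 0)
      = if 1 ≤ t ∧ t < 1 + n ∧ t < cf.length ∧ rs.any (fun i => hit i t) then 1 else cf.getD t 0 := by
  induction rs generalizing cf with
  | nil => simp
  | cons i rs ih =>
      simp only [List.foldl_cons, List.any_cons]
      rw [ih, pv_foldl_set_length, pvb_foldl_set_getD]
      by_cases h0 : 1 ≤ t <;> by_cases h1 : t < 1 + n <;> by_cases h2 : t < cf.length <;>
        by_cases h3 : hit i t = true <;> simp [h0, h1, h2, h3]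

-- unconditional fill fold: length
theorem pvb_fill_len (js : List Nat) (base : List Int) :
    (js.foldl (fun (r : List Int) j => r.set j 1) base).length = base.length := by
  induction js generalizing base with
  | nil => rfl
  | cons j js ih => rw [List.foldl_cons, ih, List.length_set]

-- unconditional fill fold over range c: entrywise
theorem pvb_fill_getD (c : Nat) (base : List Int) (t : Nat) :
    ((List.range c).foldl (fun (r : List Int) j => r.set j 1) base).getD t 0
      = if t < c ∧ t < base.length then 1 else base.getD t 0 := by
  induction c with
  | zero => simp
  | succ c ih =>
      rw [List.range_succ, List.foldl_append, List.foldl_cons, List.foldl_nil,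
        pv_getD_set, pvb_fill_len, ih]
      by_cases h1 : t = c
      · subst h1
        by_cases h2 : t < base.length <;> simp [h2] <;> omega
      · have h2 : t < c + 1 ↔ t < c ∨ t = c := by omega
        simp [h1, h2]


-- the row-0 `any` is blind to a write at column 0 of another row's copy
theorem pvb_any_set0 (r : List Int) (js : List Nat) (hjs : ∀ j ∈ js, j ≠ 0) :
    js.any (fun j => (r.set 0 1).getD j 0 == 1) = js.any (fun j => r.getD j 0 == 1) := by
  rw [Bool.eq_iff_iff]
  simp only [List.any_eq_true]
  constructor
  · rintro ⟨j, hm, hj⟩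
    refine ⟨j, hm, ?_⟩
    have h : (r.set 0 1).getD j 0 = r.getD j 0 := by
      rw [pv_getD_set]; exact if_neg (fun hc => hjs j hm hc.1)
    rwa [h] at hj
  · rintro ⟨j, hm, hj⟩
    refine ⟨j, hm, ?_⟩
    have h : (r.set 0 1).getD j 0 = r.getD j 0 := by
      rw [pv_getD_set]; exact if_neg (fun hc => hjs j hm hc.1)
    rwa [h]

-- the column-marking fold is blind to a write at column 0 of the scanned row
theorem pvb_fold_set0 (r : List Int) (js : List Nat) (hjs : ∀ j ∈ js, j ≠ 0) (a : List Int) :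
    js.foldl (fun acc j => if (r.set 0 1).getD j 0 == 1 then acc.set j 1 else acc) a
      = js.foldl (fun acc j => if r.getD j 0 == 1 then acc.set j 1 else acc) a := by
  refine PySem.List.foldl_congr_mem _ _ _ _ (fun acc j hm => ?_)
  have h : (r.set 0 1).getD j 0 = r.getD j 0 := by
    rw [pv_getD_set]; exact if_neg (fun hc => hjs j hm hc.1)
  rw [h]

-- commuting two disjoint row writes
theorem pvb_set_shuffle (m : List (List Int)) (i : Nat) (hi0 : i ≠ 0) (A B X Y : List Int) :
    (((m.set i A).set 0 B).set i X).set 0 Y = (m.set i X).set 0 Y := by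
  rw [List.set_comm _ _ (show (0:Nat) ≠ i from fun h => hi0 h.symm), List.set_set, List.set_set]

-- marking inner loop: one pass over row i's interior = one conditional row-flag set
-- plus an independent column-flag fold into row 0
theorem pv_mark_inner (m : List (List Int)) (i : Nat) (js : List Nat)
    (hi0 : i ≠ 0) (hiR : i < m.length) (hjs : ∀ j ∈ js, j ≠ 0) :
    js.foldl (fun m j =>
      if (m.getD i []).getD j 0 == 1 then
        (m.set i ((m.getD i []).set 0 1)).set 0
          (((m.set i ((m.getD i []).set 0 1)).getD 0 []).set j 1)
      else m) m
    = (m.set i (if js.any (fun j => (m.getD i []).getD j 0 == 1)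
                then (m.getD i []).set 0 1 else (m.getD i []))).set 0
        (js.foldl (fun a j => if (m.getD i []).getD j 0 == 1 then a.set j 1 else a) (m.getD 0 [])) := by
  induction js generalizing m with
  | nil =>
      simp only [List.foldl_nil, List.any_nil, if_neg (by decide : ¬ (false = true))]
      rw [List.getD_eq_getElem _ _ hiR, List.set_getElem_self,
        List.getD_eq_getElem _ _ (by omega : 0 < m.length), List.set_getElem_self]
  | cons j js ih =>
      have hj0 : j ≠ 0 := hjs j (by simp)
      have hjs' : ∀ x ∈ js, x ≠ 0 := fun x hx => hjs x (by simp [hx])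
      simp only [List.foldl_cons, List.any_cons]
      by_cases hc : (m.getD i []).getD j 0 == 1
      · rw [if_pos hc]
        have h0len : 0 < m.length := by omega
        have hg0 : (m.set i ((m.getD i []).set 0 1)).getD 0 [] = m.getD 0 [] := by
          rw [pv_getD_set, if_neg (fun hcc => hi0 hcc.1.symm)]
        rw [hg0]
        set m' := (m.set i ((m.getD i []).set 0 1)).set 0 ((m.getD 0 []).set j 1) with hm'
        have hlen' : m'.length = m.length := by rw [hm']; simp
        have hgi : m'.getD i [] = (m.getD i []).set 0 1 := by
          rw [hm', pv_getD_set, if_neg (fun hcc => hi0 hcc.1), pv_getD_set,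
            if_pos ⟨rfl, hiR⟩]
        have hg0' : m'.getD 0 [] = (m.getD 0 []).set j 1 := by
          rw [hm', pv_getD_set, if_pos ⟨rfl, by simp; omega⟩]
        rw [ih m' (by omega) hjs', hgi, hg0',
          pvb_any_set0 _ _ hjs', pvb_fold_set0 _ _ hjs']
        have hX : (if js.any (fun j => (m.getD i []).getD j 0 == 1) = true
            then ((m.getD i []).set 0 1).set 0 1 else (m.getD i []).set 0 1)
            = (m.getD i []).set 0 1 := by
          split <;> simp [List.set_set]
        rw [hX, hm', pvb_set_shuffle m i hi0]
        have hc' : (m.getD i []).getD j 0 = 1 := by simpa using hc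
        simp only [List.getD_eq_getElem?_getD] at hc'
        simp [hc']
      · rw [if_neg (by simpa using hc), ih m hiR hjs']
        have h' : ¬ (m.getD i []).getD j 0 = 1 := by simpa using hc
        simp only [List.getD_eq_getElem?_getD] at h'
        simp [h']
-- marking outer loop: lengths, flagged rows, and the accumulated row 0
theorem pv_mark_outer (m : List (List Int)) (k n : Nat) (hk : 1 + k ≤ m.length) :
    ((List.range' 1 k).foldl (fun m i =>
        (List.range' 1 n).foldl (fun m j =>
          if (m.getD i []).getD j 0 == 1 then
            (m.set i ((m.getD i []).set 0 1)).set 0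
              (((m.set i ((m.getD i []).set 0 1)).getD 0 []).set j 1)
          else m) m) m).length = m.length ∧
    (∀ t, 1 ≤ t → ((List.range' 1 k).foldl (fun m i =>
        (List.range' 1 n).foldl (fun m j =>
          if (m.getD i []).getD j 0 == 1 then
            (m.set i ((m.getD i []).set 0 1)).set 0
              (((m.set i ((m.getD i []).set 0 1)).getD 0 []).set j 1)
          else m) m) m).getD t []
      = if t < 1 + k ∧ (List.range' 1 n).any (fun j => (m.getD t []).getD j 0 == 1)
        then (m.getD t []).set 0 1 else m.getD t []) ∧
    ((List.range' 1 k).foldl (fun m i =>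
        (List.range' 1 n).foldl (fun m j =>
          if (m.getD i []).getD j 0 == 1 then
            (m.set i ((m.getD i []).set 0 1)).set 0
              (((m.set i ((m.getD i []).set 0 1)).getD 0 []).set j 1)
          else m) m) m).getD 0 []
      = (List.range' 1 k).foldl (fun a i =>
          (List.range' 1 n).foldl (fun a j =>
            if (m.getD i []).getD j 0 == 1 then a.set j 1 else a) a) (m.getD 0 []) := by
  induction k with
  | zero =>
      refine ⟨rfl, fun t ht => ?_, rfl⟩
      rw [List.range'_zero, List.foldl_nil, if_neg (fun hc => absurd hc.1 (by omega))]
  | succ k ih =>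
      obtain ⟨hlen, hrow, hr0⟩ := ih (by omega)
      rw [List.range'_1_concat]
      simp only [List.foldl_append, List.foldl_cons, List.foldl_nil]
      set Mk := (List.range' 1 k).foldl (fun m i =>
        (List.range' 1 n).foldl (fun m j =>
          if (m.getD i []).getD j 0 == 1 then
            (m.set i ((m.getD i []).set 0 1)).set 0
              (((m.set i ((m.getD i []).set 0 1)).getD 0 []).set j 1)
          else m) m) m with hMk
      have hjs : ∀ j ∈ List.range' 1 n, j ≠ 0 := by
        intro j hj
        have := List.mem_range'_1.1 hj
        omega
      have hstep := pv_mark_inner Mk (1 + k) (List.range' 1 n) (by omega)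
        (by rw [hlen]; omega) hjs
      have hMkrow : Mk.getD (1 + k) [] = m.getD (1 + k) [] := by
        rw [hrow (1 + k) (by omega), if_neg (fun hc => by omega)]
      rw [hstep, hMkrow, hr0]
      refine ⟨by simp [hlen], fun t ht => ?_, ?_⟩
      · rw [pv_getD_set, if_neg (fun hc => absurd hc.1 (by omega)), pv_getD_set, hlen]
        by_cases h1 : t = 1 + k
        · rw [if_pos ⟨h1, by omega⟩, h1]
          by_cases hA : (List.range' 1 n).any (fun j => (m.getD (1 + k) []).getD j 0 == 1) = true
          · rw [if_pos hA, if_pos ⟨by omega, hA⟩]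
          · rw [if_neg hA, if_neg (fun hc => hA hc.2)]
        · rw [if_neg (fun hc => h1 hc.1), hrow t ht]
          by_cases hA : (List.range' 1 n).any (fun j => (m.getD t []).getD j 0 == 1) = true
          · by_cases h2 : t < 1 + k
            · rw [if_pos ⟨h2, hA⟩, if_pos ⟨by omega, hA⟩]
            · rw [if_neg (fun hc => h2 hc.1), if_neg (fun hc => absurd hc.1 (by omega))]
          · rw [if_neg (fun hc => hA hc.2), if_neg (fun hc => hA hc.2)]
      · rw [pv_getD_set, if_pos ⟨rfl, by simp [hlen]; omega⟩]

-- spreading inner loop: one pass over row i's interior = one row update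
theorem pv_spread_inner (m : List (List Int)) (i : Nat) (js : List Nat)
    (hi0 : i ≠ 0) (hiR : i < m.length) (hjs : ∀ j ∈ js, j ≠ 0) :
    js.foldl (fun m j =>
      if (m.getD i []).getD 0 0 == 1 || (m.getD 0 []).getD j 0 == 1 then
        m.set i ((m.getD i []).set j 1)
      else m) m
    = m.set i (js.foldl (fun r j =>
        if (m.getD i []).getD 0 0 == 1 || (m.getD 0 []).getD j 0 == 1 then r.set j 1 else r)
        (m.getD i [])) := by
  induction js generalizing m with
  | nil =>
      simp only [List.foldl_nil]
      rw [List.getD_eq_getElem _ _ hiR, List.set_getElem_self]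
  | cons j js ih =>
      have hj0 : j ≠ 0 := hjs j (by simp)
      have hjs' : ∀ x ∈ js, x ≠ 0 := fun x hx => hjs x (by simp [hx])
      simp only [List.foldl_cons]
      by_cases hc : ((m.getD i []).getD 0 0 == 1 || (m.getD 0 []).getD j 0 == 1) = true
      · rw [if_pos hc]
        set m' := m.set i ((m.getD i []).set j 1) with hm'
        have hgi : m'.getD i [] = (m.getD i []).set j 1 := by
          rw [hm', pv_getD_set, if_pos ⟨rfl, hiR⟩]
        have hg0 : m'.getD 0 [] = m.getD 0 [] := by
          rw [hm', pv_getD_set, if_neg (fun hcc => hi0 hcc.1.symm)]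
        have hgi0 : (m'.getD i []).getD 0 0 = (m.getD i []).getD 0 0 := by
          rw [hgi, pv_getD_set, if_neg (fun hcc => hj0 hcc.1.symm)]
        rw [ih m' (by rw [hm']; simpa using hiR) hjs', hgi0, hg0, hgi, hm', List.set_set]
        rw [if_pos hc]
      · rw [if_neg hc, ih m hiR hjs', if_neg hc]

-- spreading outer loop: lengths, row 0 untouched, processed rows updated
theorem pv_spread_outer (m : List (List Int)) (k n : Nat) (hk : 1 + k ≤ m.length) :
    ((List.range' 1 k).foldl (fun m i =>
        (List.range' 1 n).foldl (fun m j =>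
          if (m.getD i []).getD 0 0 == 1 || (m.getD 0 []).getD j 0 == 1 then
            m.set i ((m.getD i []).set j 1)
          else m) m) m).length = m.length ∧
    ((List.range' 1 k).foldl (fun m i =>
        (List.range' 1 n).foldl (fun m j =>
          if (m.getD i []).getD 0 0 == 1 || (m.getD 0 []).getD j 0 == 1 then
            m.set i ((m.getD i []).set j 1)
          else m) m) m).getD 0 [] = m.getD 0 [] ∧
    (∀ t, 1 ≤ t → ((List.range' 1 k).foldl (fun m i =>
        (List.range' 1 n).foldl (fun m j =>
          if (m.getD i []).getD 0 0 == 1 || (m.getD 0 []).getD j 0 == 1 then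
            m.set i ((m.getD i []).set j 1)
          else m) m) m).getD t []
      = if t < 1 + k then
          (List.range' 1 n).foldl (fun r j =>
            if (m.getD t []).getD 0 0 == 1 || (m.getD 0 []).getD j 0 == 1 then r.set j 1 else r)
            (m.getD t [])
        else m.getD t []) := by
  induction k with
  | zero =>
      refine ⟨rfl, rfl, fun t ht => ?_⟩
      rw [List.range'_zero, List.foldl_nil, if_neg (by omega)]
  | succ k ih =>
      obtain ⟨hlen, hr0, hrow⟩ := ih (by omega)
      rw [List.range'_1_concat]
      simp only [List.foldl_append, List.foldl_cons, List.foldl_nil]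
      set Mk := (List.range' 1 k).foldl (fun m i =>
        (List.range' 1 n).foldl (fun m j =>
          if (m.getD i []).getD 0 0 == 1 || (m.getD 0 []).getD j 0 == 1 then
            m.set i ((m.getD i []).set j 1)
          else m) m) m with hMk
      have hjs : ∀ j ∈ List.range' 1 n, j ≠ 0 := by
        intro j hj
        have := List.mem_range'_1.1 hj
        omega
      have hstep := pv_spread_inner Mk (1 + k) (List.range' 1 n) (by omega)
        (by rw [hlen]; omega) hjs
      have hMkrow : Mk.getD (1 + k) [] = m.getD (1 + k) [] := by
        rw [hrow (1 + k) (by omega), if_neg (by omega)]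
      rw [hstep, hMkrow, hr0]
      refine ⟨by rw [List.length_set]; exact hlen, ?_, fun t ht => ?_⟩
      · rw [pv_getD_set, if_neg (fun hc => absurd hc.1 (by omega))]
        exact hr0
      · rw [pv_getD_set, hlen]
        by_cases h1 : t = 1 + k
        · rw [if_pos ⟨h1, by omega⟩, h1, if_pos (by omega)]
        · rw [if_neg (fun hc => h1 hc.1), hrow t ht]
          by_cases h2 : t < 1 + k
          · rw [if_pos h2, if_pos (by omega)]
          · rw [if_neg h2, if_neg (by omega)]

-- filling row 0: the whole-matrix fold is one row update
theorem pv_fill_row (js : List Nat) (m : List (List Int)) (h0 : 0 < m.length) :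
    js.foldl (fun m j => m.set 0 ((m.getD 0 []).set j 1)) m
      = m.set 0 (js.foldl (fun (r : List Int) j => r.set j 1) (m.getD 0 [])) := by
  induction js generalizing m with
  | nil =>
      simp only [List.foldl_nil]
      rw [List.getD_eq_getElem _ _ h0, List.set_getElem_self]
  | cons j js ih =>
      simp only [List.foldl_cons]
      rw [ih _ (by simpa using h0), pv_getD_set, if_pos ⟨rfl, h0⟩, List.set_set]

-- filling column 0: lengths and rows
theorem pv_fill_col (m : List (List Int)) (k : Nat) :
    ((List.range k).foldl (fun m i => m.set i ((m.getD i []).set 0 1)) m).length = m.length ∧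
    (∀ t, ((List.range k).foldl (fun m i => m.set i ((m.getD i []).set 0 1)) m).getD t []
      = if t < k ∧ t < m.length then (m.getD t []).set 0 1 else m.getD t []) := by
  induction k with
  | zero =>
      refine ⟨rfl, fun t => ?_⟩
      rw [List.range_zero, List.foldl_nil, if_neg (fun hc => absurd hc.1 (by omega))]
  | succ k ih =>
      obtain ⟨hlen, hrow⟩ := ih
      rw [List.range_succ]
      simp only [List.foldl_append, List.foldl_cons, List.foldl_nil]
      have hgk : ((List.range k).foldl (fun m i => m.set i ((m.getD i []).set 0 1)) m).getD k []
          = m.getD k [] := by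
        rw [hrow k, if_neg (fun hc => by omega)]
      rw [hgk]
      refine ⟨by rw [List.length_set]; exact hlen, fun t => ?_⟩
      rw [pv_getD_set, hlen, hrow t]
      by_cases h2 : t < m.length
      · by_cases h1 : t = k
        · rw [if_pos ⟨h1, h2⟩, if_pos ⟨by omega, h2⟩, h1]
        · rw [if_neg (fun hc => h1 hc.1)]
          by_cases h3 : t < k
          · rw [if_pos ⟨h3, h2⟩, if_pos ⟨by omega, h2⟩]
          · rw [if_neg (fun hc => h3 hc.1), if_neg (fun hc => absurd hc.1 (by omega))]
      · rw [if_neg (fun hc => h2 hc.2), if_neg (fun hc => h2 hc.2), if_neg (fun hc => h2 hc.2)]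

-- the spec map, lets unfolded
theorem pv_spec_map_eq (m : List (List Int)) :
    pvSpecMap m = m.map (fun row =>
      if (row.take (m.headD []).length).contains 1 then
        List.replicate (m.headD []).length 1 ++ row.drop (m.headD []).length
      else (List.range (m.headD []).length).foldl (fun r j =>
        if (List.map (fun j => m.any fun row => row.getD j 0 == 1)
            (List.range (m.headD []).length)).getD j false then r.set j 1 else r) row) := rfl

-- the hot-column table, entrywise
theorem pv_hot_getD (m : List (List Int)) (C j : Nat) :
    (List.map (fun j => m.any fun row => row.getD j 0 == 1) (List.range C)).getD j false
      = if j < C then (List.range m.length).any (fun i => (m.getD i []).getD j 0 == 1) else false := by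
  by_cases hj : j < C
  · rw [PySem.List.getD_map_range _ _ _ _ hj, if_pos hj, pv_any_range]
  · rw [if_neg hj, List.getD_eq_getElem?_getD, List.getElem?_eq_none (by simp; omega)]
    rfl

theorem pv_spec_len (m : List (List Int)) : (pvSpecMap m).length = m.length := by
  rw [pv_spec_map_eq, List.length_map]

-- the spec map, row by row
theorem pv_spec_row (m : List (List Int)) (t : Nat) (ht : t < m.length) :
    (pvSpecMap m).getD t []
      = (if ((m.getD t []).take (m.headD []).length).contains 1 then
          List.replicate (m.headD []).length 1 ++ (m.getD t []).drop (m.headD []).length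
        else (List.range (m.headD []).length).foldl (fun r j =>
          if (List.map (fun j => m.any fun row => row.getD j 0 == 1)
              (List.range (m.headD []).length)).getD j false then r.set j 1 else r) (m.getD t [])) := by
  rw [pv_spec_map_eq, List.getD_eq_getElem?_getD, List.getElem?_map, List.getElem?_eq_getElem ht]
  simp only [Option.map_some, Option.getD_some]
  rw [List.getD_eq_getElem _ _ ht]

-- the spec map preserves row lengths
theorem pv_spec_row_len (m : List (List Int))
    (hrows : ∀ row ∈ m, (m.headD []).length ≤ row.length) (t : Nat) :
    ((pvSpecMap m).getD t []).length = (m.getD t []).length := by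
  by_cases ht : t < m.length
  · rw [pv_spec_row m t ht]
    have hCrow : (m.headD []).length ≤ (m.getD t []).length := by
      rw [List.getD_eq_getElem _ _ ht]; exact hrows _ (List.getElem_mem ht)
    split
    · rw [List.length_append, List.length_replicate, List.length_drop]; omega
    · rw [pv_foldl_set_length]
  · rw [pv_getD_nil _ _ _ (by rw [pv_spec_len]; omega), pv_getD_nil _ _ _ (by omega)]

-- the spec map, entrywise
theorem pv_spec_getD (m : List (List Int))
    (hrows : ∀ row ∈ m, (m.headD []).length ≤ row.length) (t s : Nat) (ht : t < m.length) :
    ((pvSpecMap m).getD t []).getD s 0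
      = if s < (m.headD []).length ∧
          ((List.range (m.headD []).length).any (fun j => (m.getD t []).getD j 0 == 1)
            || (List.range m.length).any (fun i => (m.getD i []).getD s 0 == 1)) = true
        then 1 else (m.getD t []).getD s 0 := by
  have hCrow : (m.headD []).length ≤ (m.getD t []).length := by
    rw [List.getD_eq_getElem _ _ ht]; exact hrows _ (List.getElem_mem ht)
  rw [pv_spec_row m t ht, pv_contains_take _ _ hCrow]
  by_cases hhot : (List.range (m.headD []).length).any (fun j => (m.getD t []).getD j 0 == 1) = true
  · rw [if_pos hhot, pv_getD_fill _ _ hCrow]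
    by_cases hs : s < (m.headD []).length
    · rw [if_pos hs, if_pos ⟨hs, by rw [hhot]; rfl⟩]
    · rw [if_neg hs, if_neg (fun hc => hs hc.1)]
  · rw [if_neg hhot, pv_foldl_set_getD, pv_hot_getD]
    by_cases hs : s < (m.headD []).length
    · by_cases hcol : (List.range m.length).any (fun i => (m.getD i []).getD s 0 == 1) = true
      · rw [if_pos ⟨hs, by rw [if_pos hs]; exact hcol, by omega⟩,
          if_pos ⟨hs, by rw [hcol, Bool.or_true]⟩]
      · rw [if_neg, if_neg]
        · rintro ⟨-, hor⟩
          rcases Bool.or_eq_true_iff.mp hor with h | h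
          · exact hhot h
          · exact hcol h
        · rintro ⟨-, hif, -⟩
          rw [if_pos hs] at hif
          exact hcol hif
    · rw [if_neg (fun hc => hs hc.1), if_neg (fun hc => hs hc.1)]

-- B equals the row-map description
theorem pv_B_eq_spec (m : List (List Int)) (hpre : Pre_booleanMatrix m) :
    booleanMatrix_alt m = pvSpecMap m := by
  obtain ⟨hne, hrows⟩ := hpre
  have hR1 : 1 ≤ m.length := by
    cases m with
    | nil => exact absurd rfl hne
    | cons a l => simp
  have hB : booleanMatrix_alt m =
      (if (m.headD []).length = 0 then m else
        (if (List.range m.length).any (fun i => (m.getD i []).getD 0 0 == 1) then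
          (List.range m.length).foldl (fun mm i => mm.set i ((mm.getD i []).set 0 1))
            (if (List.range (m.headD []).length).any (fun j => (m.getD 0 []).getD j 0 == 1) then
              (List.range (m.headD []).length).foldl (fun mm j => mm.set 0 ((mm.getD 0 []).set j 1))
                ((List.range' 1 (m.length - 1)).foldl (fun mm i =>
                  (List.range' 1 ((m.headD []).length - 1)).foldl (fun mm j =>
                    if (mm.getD i []).getD 0 0 == 1 || (mm.getD 0 []).getD j 0 == 1 then
                      mm.set i ((mm.getD i []).set j 1)
                    else mm) mm)
                  ((List.range' 1 (m.length - 1)).foldl (fun mm i =>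
                    (List.range' 1 ((m.headD []).length - 1)).foldl (fun mm j =>
                      if (mm.getD i []).getD j 0 == 1 then
                        (mm.set i ((mm.getD i []).set 0 1)).set 0
                          (((mm.set i ((mm.getD i []).set 0 1)).getD 0 []).set j 1)
                      else mm) mm) m))
            else
              ((List.range' 1 (m.length - 1)).foldl (fun mm i =>
                (List.range' 1 ((m.headD []).length - 1)).foldl (fun mm j =>
                  if (mm.getD i []).getD 0 0 == 1 || (mm.getD 0 []).getD j 0 == 1 then
                    mm.set i ((mm.getD i []).set j 1)
                  else mm) mm)
                ((List.range' 1 (m.length - 1)).foldl (fun mm i =>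
                  (List.range' 1 ((m.headD []).length - 1)).foldl (fun mm j =>
                    if (mm.getD i []).getD j 0 == 1 then
                      (mm.set i ((mm.getD i []).set 0 1)).set 0
                        (((mm.set i ((mm.getD i []).set 0 1)).getD 0 []).set j 1)
                    else mm) mm) m)))
        else
          (if (List.range (m.headD []).length).any (fun j => (m.getD 0 []).getD j 0 == 1) then
            (List.range (m.headD []).length).foldl (fun mm j => mm.set 0 ((mm.getD 0 []).set j 1))
              ((List.range' 1 (m.length - 1)).foldl (fun mm i =>
                (List.range' 1 ((m.headD []).length - 1)).foldl (fun mm j =>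
                  if (mm.getD i []).getD 0 0 == 1 || (mm.getD 0 []).getD j 0 == 1 then
                    mm.set i ((mm.getD i []).set j 1)
                  else mm) mm)
                ((List.range' 1 (m.length - 1)).foldl (fun mm i =>
                  (List.range' 1 ((m.headD []).length - 1)).foldl (fun mm j =>
                    if (mm.getD i []).getD j 0 == 1 then
                      (mm.set i ((mm.getD i []).set 0 1)).set 0
                        (((mm.set i ((mm.getD i []).set 0 1)).getD 0 []).set j 1)
                    else mm) mm) m))
          else
            ((List.range' 1 (m.length - 1)).foldl (fun mm i =>
              (List.range' 1 ((m.headD []).length - 1)).foldl (fun mm j =>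
                if (mm.getD i []).getD 0 0 == 1 || (mm.getD 0 []).getD j 0 == 1 then
                  mm.set i ((mm.getD i []).set j 1)
                else mm) mm)
              ((List.range' 1 (m.length - 1)).foldl (fun mm i =>
                (List.range' 1 ((m.headD []).length - 1)).foldl (fun mm j =>
                  if (mm.getD i []).getD j 0 == 1 then
                    (mm.set i ((mm.getD i []).set 0 1)).set 0
                      (((mm.set i ((mm.getD i []).set 0 1)).getD 0 []).set j 1)
                  else mm) mm) m))))) := rfl
  by_cases hC0 : (m.headD []).length = 0
  · rw [hB, if_pos hC0, pv_spec_map_eq, hC0]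
    simp
  · rw [hB, if_neg hC0]
    have hC1 : 1 ≤ (m.headD []).length := by omega
    have hRR : 1 + (m.length - 1) = m.length := by omega
    have hCC : 1 + ((m.headD []).length - 1) = (m.headD []).length := by omega
    have hr0len : (m.getD 0 []).length = (m.headD []).length := by
      rw [← pv_headD_getD]
    have hrowlen : ∀ t, t < m.length → (m.headD []).length ≤ (m.getD t []).length := by
      intro t ht
      rw [List.getD_eq_getElem _ _ ht]
      exact hrows _ (List.getElem_mem ht)
    have hC' : (m.headD []).length = ((m.headD []).length - 1) + 1 := by omega
    have hR' : m.length = (m.length - 1) + 1 := by omega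
    have hsplitC : List.range (m.headD []).length
        = 0 :: List.range' 1 ((m.headD []).length - 1) := by
      conv_lhs => rw [hC']
      rw [List.range_eq_range', List.range'_succ]
    have hsplitR : List.range m.length = 0 :: List.range' 1 (m.length - 1) := by
      conv_lhs => rw [hR']
      rw [List.range_eq_range', List.range'_succ]
    obtain ⟨hm1len, hm1row, hm1r0⟩ :=
      pv_mark_outer m (m.length - 1) ((m.headD []).length - 1) (by omega)
    obtain ⟨hm2len, hm2r0, hm2row⟩ :=
      pv_spread_outer _ (m.length - 1) ((m.headD []).length - 1) (by rw [hm1len]; omega)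
    set M1 := (List.range' 1 (m.length - 1)).foldl (fun mm i =>
      (List.range' 1 ((m.headD []).length - 1)).foldl (fun mm j =>
        if (mm.getD i []).getD j 0 == 1 then
          (mm.set i ((mm.getD i []).set 0 1)).set 0
            (((mm.set i ((mm.getD i []).set 0 1)).getD 0 []).set j 1)
        else mm) mm) m with hM1def
    set M2 := (List.range' 1 (m.length - 1)).foldl (fun mm i =>
      (List.range' 1 ((m.headD []).length - 1)).foldl (fun mm j =>
        if (mm.getD i []).getD 0 0 == 1 || (mm.getD 0 []).getD j 0 == 1 then
          mm.set i ((mm.getD i []).set j 1)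
        else mm) mm) M1 with hM2def
    rw [hRR] at hm1row hm2row
    have hM2pos : 0 < M2.length := by rw [hm2len, hm1len]; omega
    have hm1r0e : ∀ s, (M1.getD 0 []).getD s 0
        = if 1 ≤ s ∧ s < (m.headD []).length ∧
            (List.range' 1 (m.length - 1)).any (fun i => (m.getD i []).getD s 0 == 1) = true
          then 1 else (m.getD 0 []).getD s 0 := by
      intro s
      rw [hm1r0, pvb_col_getD, hCC, hr0len]
      exact if_congr ⟨fun h => ⟨h.1, h.2.1, h.2.2.2⟩,
        fun h => ⟨h.1, h.2.1, h.2.1, h.2.2⟩⟩ rfl rfl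
    have hm1r0len : (M1.getD 0 []).length = (m.headD []).length := by
      rw [hm1r0, pvb_col_len, hr0len]
    have hm1tlen : ∀ t, (M1.getD t []).length = (m.getD t []).length := by
      intro t
      by_cases h : 1 ≤ t
      · rw [hm1row t h]
        split
        · rw [List.length_set]
        · rfl
      · have ht0 : t = 0 := by omega
        rw [ht0, hm1r0len, ← hr0len]
    have hm1int : ∀ t s, 1 ≤ t → 1 ≤ s →
        (M1.getD t []).getD s 0 = (m.getD t []).getD s 0 := by
      intro t s ht hs
      rw [hm1row t ht]
      split
      · rw [pv_getD_set, if_neg (fun hc => absurd hc.1 (by omega))]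
      · rfl
    have hm1t00 : ∀ t, 1 ≤ t → t < m.length → (M1.getD t []).getD 0 0
        = (if (List.range' 1 ((m.headD []).length - 1)).any
              (fun j => (m.getD t []).getD j 0 == 1) = true
           then 1 else (m.getD t []).getD 0 0) := by
      intro t ht htR
      rw [hm1row t ht]
      by_cases hih : (List.range' 1 ((m.headD []).length - 1)).any
          (fun j => (m.getD t []).getD j 0 == 1) = true
      · rw [if_pos ⟨htR, hih⟩, if_pos hih, pv_getD_set,
          if_pos ⟨rfl, by have := hrowlen t htR; omega⟩]
      · rw [if_neg (fun hc => hih hc.2), if_neg hih]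
    have hK1 : ∀ t, 1 ≤ t → t < m.length → ((M1.getD t []).getD 0 0 == 1)
        = (List.range (m.headD []).length).any (fun j => (m.getD t []).getD j 0 == 1) := by
      intro t ht htR
      rw [hm1t00 t ht htR, hsplitC]
      by_cases hih : (List.range' 1 ((m.headD []).length - 1)).any
          (fun j => (m.getD t []).getD j 0 == 1) = true
      · rw [if_pos hih, List.any_cons, hih, Bool.or_true]; decide
      · rw [if_neg hih, List.any_cons, Bool.eq_false_iff.mpr hih, Bool.or_false]
    have hK2 : ∀ s, 1 ≤ s → s < (m.headD []).length → ((M1.getD 0 []).getD s 0 == 1)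
        = (List.range m.length).any (fun i => (m.getD i []).getD s 0 == 1) := by
      intro s hs hsC
      rw [hm1r0e s, hsplitR]
      by_cases hic : (List.range' 1 (m.length - 1)).any
          (fun i => (m.getD i []).getD s 0 == 1) = true
      · rw [if_pos ⟨hs, hsC, hic⟩, List.any_cons, hic, Bool.or_true]; decide
      · rw [if_neg (fun hc => hic hc.2.2), List.any_cons,
          Bool.eq_false_iff.mpr hic, Bool.or_false]
    have hm2tlen : ∀ t, (M2.getD t []).length = (m.getD t []).length := by
      intro t
      by_cases h : 1 ≤ t
      · rw [hm2row t h]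
        split
        · rw [pv_foldl_set_length, hm1tlen]
        · rw [hm1tlen]
      · have ht0 : t = 0 := by omega
        rw [ht0, hm2r0, hm1r0len, ← hr0len]
    have hm2int : ∀ t s, 1 ≤ t → t < m.length → 1 ≤ s → (M2.getD t []).getD s 0
        = if s < (m.headD []).length ∧
            ((List.range (m.headD []).length).any (fun j => (m.getD t []).getD j 0 == 1)
              || (List.range m.length).any (fun i => (m.getD i []).getD s 0 == 1)) = true
          then 1 else (m.getD t []).getD s 0 := by
      intro t s ht htR hs
      rw [hm2row t ht, if_pos htR, pvb_foldl_set_getD, hCC]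
      by_cases hsC : s < (m.headD []).length
      · rw [hK1 t ht htR, hK2 s hs hsC]
        have hslen : s < (M1.getD t []).length := by
          rw [hm1tlen]; have := hrowlen t htR; omega
        by_cases hor : ((List.range (m.headD []).length).any
              (fun j => (m.getD t []).getD j 0 == 1)
            || (List.range m.length).any (fun i => (m.getD i []).getD s 0 == 1)) = true
        · rw [if_pos ⟨hs, hsC, hor, hslen⟩, if_pos ⟨hsC, hor⟩]
        · rw [if_neg (fun hc => hor hc.2.2.1), if_neg (fun hc => hor hc.2), hm1int t s ht hs]
      · rw [if_neg (fun hc => hsC hc.2.1), if_neg (fun hc => hsC hc.1), hm1int t s ht hs]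
    have hm2t00 : ∀ t, 1 ≤ t → t < m.length →
        (M2.getD t []).getD 0 0 = (M1.getD t []).getD 0 0 := by
      intro t ht htR
      rw [hm2row t ht, if_pos htR, pvb_foldl_set_getD,
        if_neg (fun hc => absurd hc.1 (by omega))]
    set M3 := (if (List.range (m.headD []).length).any
          (fun j => (m.getD 0 []).getD j 0 == 1) then
        (List.range (m.headD []).length).foldl
          (fun mm j => mm.set 0 ((mm.getD 0 []).set j 1)) M2
      else M2) with hM3def
    have hM2r0len : (M2.getD 0 []).length = (m.getD 0 []).length := by
      rw [hm2r0, hm1r0len, hr0len]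
    have hm3len : M3.length = m.length := by
      rw [hM3def]
      split
      · rw [pv_fill_row _ _ hM2pos, List.length_set, hm2len, hm1len]
      · rw [hm2len, hm1len]
    have hm3row : ∀ t, 1 ≤ t → M3.getD t [] = M2.getD t [] := by
      intro t ht
      rw [hM3def]
      split
      · rw [pv_fill_row _ _ hM2pos, pv_getD_set, if_neg (fun hc => absurd hc.1 (by omega))]
      · rfl
    have hm3r0e : ∀ s, (M3.getD 0 []).getD s 0
        = if (List.range (m.headD []).length).any
              (fun j => (m.getD 0 []).getD j 0 == 1) = true ∧ s < (m.headD []).length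
          then 1 else (M2.getD 0 []).getD s 0 := by
      intro s
      rw [hM3def]
      by_cases hfr : (List.range (m.headD []).length).any
          (fun j => (m.getD 0 []).getD j 0 == 1) = true
      · rw [if_pos hfr, pv_fill_row _ _ hM2pos, pv_getD_set, if_pos ⟨rfl, hM2pos⟩,
          pvb_fill_getD, hM2r0len, hr0len]
        by_cases hs : s < (m.headD []).length
        · rw [if_pos ⟨hs, hs⟩, if_pos ⟨hfr, hs⟩]
        · rw [if_neg (fun hc => hs hc.1), if_neg (fun hc => hs hc.2)]
      · rw [if_neg hfr, if_neg (fun hc => hfr hc.1)]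
    have hm3tlen : ∀ t, (M3.getD t []).length = (m.getD t []).length := by
      intro t
      by_cases h : 1 ≤ t
      · rw [hm3row t h, hm2tlen]
      · have ht0 : t = 0 := by omega
        rw [ht0, hM3def]
        split
        · rw [pv_fill_row _ _ hM2pos, pv_getD_set, if_pos ⟨rfl, hM2pos⟩,
            pvb_fill_len, hM2r0len]
        · rw [hM2r0len]
    have hM3s : ∀ t s, t < m.length → 1 ≤ s →
        (M3.getD t []).getD s 0 = ((pvSpecMap m).getD t []).getD s 0 := by
      intro t s htR hs
      rw [pv_spec_getD m hrows t s htR]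
      by_cases ht : 1 ≤ t
      · rw [hm3row t ht, hm2int t s ht htR hs]
      · have ht0 : t = 0 := by omega
        rw [ht0, hm3r0e s, hm2r0, hm1r0e s]
        by_cases hfr : (List.range (m.headD []).length).any
            (fun j => (m.getD 0 []).getD j 0 == 1) = true
        · by_cases hsC : s < (m.headD []).length
          · rw [if_pos ⟨hfr, hsC⟩, if_pos ⟨hsC, by rw [hfr]; rfl⟩]
          · rw [if_neg (fun hc => hsC hc.2), if_neg (fun hc => hsC hc.2.1),
              if_neg (fun hc => hsC hc.1)]
        · rw [if_neg (fun hc => hfr hc.1)]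
          by_cases hsC : s < (m.headD []).length
          · by_cases hic : (List.range' 1 (m.length - 1)).any
                (fun i => (m.getD i []).getD s 0 == 1) = true
            · rw [if_pos ⟨hs, hsC, hic⟩, if_pos ⟨hsC, by
                rw [hsplitR, List.any_cons, hic, Bool.or_true, Bool.or_true]⟩]
            · rw [if_neg (fun hc => hic hc.2.2)]
              have hcol : (List.range m.length).any
                  (fun i => (m.getD i []).getD s 0 == 1)
                  = ((m.getD 0 []).getD s 0 == 1) := by
                rw [hsplitR, List.any_cons, Bool.eq_false_iff.mpr hic, Bool.or_false]
              by_cases hm0 : (m.getD 0 []).getD s 0 = 1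
              · rw [if_pos ⟨hsC, by rw [hcol, hm0]; simp⟩, hm0]
              · rw [if_neg (fun hc => by
                  rw [hcol] at hc
                  rcases Bool.or_eq_true_iff.mp hc.2 with h | h
                  · exact hfr h
                  · exact hm0 (by simpa using h))]
          · rw [if_neg (fun hc => absurd hc.2.1 hsC), if_neg (fun hc => hsC hc.1)]
    have hM3s0 : ∀ t, t < m.length →
        ¬ ((List.range m.length).any (fun i => (m.getD i []).getD 0 0 == 1) = true) →
        (M3.getD t []).getD 0 0 = ((pvSpecMap m).getD t []).getD 0 0 := by
      intro t htR hfc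
      rw [pv_spec_getD m hrows t 0 htR]
      have hcol0 : (List.range m.length).any
          (fun i => (m.getD i []).getD 0 0 == 1) = false := by
        rw [Bool.eq_false_iff]; exact hfc
      by_cases ht : 1 ≤ t
      · rw [hm3row t ht, hm2t00 t ht htR, hm1t00 t ht htR]
        have h00 : ((m.getD t []).getD 0 0 == 1) = false := by
          rw [Bool.eq_false_iff]
          intro h
          exact hfc (by
            rw [List.any_eq_true]
            exact ⟨t, List.mem_range.mpr htR, h⟩)
        by_cases hih : (List.range' 1 ((m.headD []).length - 1)).any
            (fun j => (m.getD t []).getD j 0 == 1) = true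
        · rw [if_pos hih, if_pos ⟨by omega, by
            rw [hsplitC, hcol0, Bool.or_false, List.any_cons, hih, Bool.or_true]⟩]
        · rw [if_neg hih, if_neg (fun hc => by
            rw [hsplitC, hcol0] at hc
            have h2 := hc.2
            rw [Bool.or_false, List.any_cons, Bool.eq_false_iff.mpr hih,
              Bool.or_false] at h2
            have h3 : ((m.getD t []).getD 0 0 == 1) = true := h2
            rw [h00] at h3
            exact Bool.false_ne_true h3)]
      · have ht0 : t = 0 := by omega
        rw [ht0, hm3r0e 0, hm2r0, hm1r0e 0]
        by_cases hfr : (List.range (m.headD []).length).any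
            (fun j => (m.getD 0 []).getD j 0 == 1) = true
        · rw [if_pos ⟨hfr, by omega⟩, if_pos ⟨by omega, by rw [hfr]; rfl⟩]
        · rw [if_neg (fun hc => hfr hc.1), if_neg (fun hc => absurd hc.1 (by omega)),
            if_neg (fun hc => by
              rw [hcol0] at hc
              rcases Bool.or_eq_true_iff.mp hc.2 with h | h
              · exact hfr h
              · exact absurd h (by simp))]
    by_cases hfc : (List.range m.length).any (fun i => (m.getD i []).getD 0 0 == 1) = true
    · rw [if_pos hfc]
      obtain ⟨hFlen, hFrow⟩ := pv_fill_col M3 m.length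
      refine pv_getD_ext [] _ _ (by rw [hFlen, hm3len, pv_spec_len]) (fun t => ?_)
      by_cases htR : t < m.length
      · refine pv_getD_ext 0 _ _ ?_ (fun s => ?_)
        · rw [hFrow t, if_pos ⟨htR, by rw [hm3len]; omega⟩, List.length_set,
            hm3tlen t, pv_spec_row_len m hrows t]
        · rw [hFrow t, if_pos ⟨htR, by rw [hm3len]; omega⟩, pv_getD_set]
          by_cases hs0 : s = 0
          · rw [hs0, if_pos ⟨rfl, by rw [hm3tlen]; have := hrowlen t htR; omega⟩,
              pv_spec_getD m hrows t 0 htR, if_pos ⟨by omega, by rw [hfc]; simp⟩]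
          · rw [if_neg (fun hc => hs0 hc.1)]
            exact hM3s t s htR (by omega)
      · rw [hFrow t, if_neg (fun hc => absurd hc.1 htR),
          pv_getD_nil _ _ _ (by rw [hm3len]; omega),
          pv_getD_nil _ _ _ (by rw [pv_spec_len]; omega)]
    · rw [if_neg hfc]
      refine pv_getD_ext [] _ _ (by rw [hm3len, pv_spec_len]) (fun t => ?_)
      by_cases htR : t < m.length
      · refine pv_getD_ext 0 _ _ (by rw [hm3tlen t, pv_spec_row_len m hrows t]) (fun s => ?_)
        by_cases hs0 : s = 0
        · rw [hs0]
          exact hM3s0 t htR hfc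
        · exact hM3s t s htR (by omega)
      · rw [pv_getD_nil _ _ _ (by rw [hm3len]; omega),
          pv_getD_nil _ _ _ (by rw [pv_spec_len]; omega)]

-- ===== VERDICT (by name: the statement is the Claim_ definition above) =====
theorem booleanMatrix_spec : Claim_equal_booleanMatrix := by
  intro m _ hpre
  unfold Spec_booleanMatrix
  rw [pv_A_eq_spec m hpre, pv_B_eq_spec m hpre]
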